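-- pv_equiv track=rewrite | github.com/zahariev-webbersof/softuni-fundamentals-2022-01 | text_processing/character_multiplier.py | sum_func
-- ===== SOURCE A (Python) =====
-- def sum_func(first_word, second_word):
--     total_sum = 0
--
--     for i in range(len(first_word)):
--         if i < len(second_word):
--             total_sum += ord(first_word[i]) * ord(second_word[i])
--         else:
--             total_sum += ord(first_word[i])
--
--     return total_sum
-- ===== SOURCE B (Python) =====
-- def sum_func(first_word, second_word):
--     # Algebraic reformulation: every character of first_word contributes its ord
--     # as a baseline; on the overlap, ord(a)*ord(b) = ord(a) + ord(a)*(ord(b)-1),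
--     # so add the correction ord(a)*(ord(b)-1) there. No branch, no tail partition.
--     base = sum(map(ord, first_word))
--     correction = sum(ord(a) * (ord(b) - 1) for a, b in zip(first_word, second_word))
--     return base + correction
-- ===== Notes on version B (the rewrite author's own statement) =====
-- stated objective: alternative
-- what changed: Replaces A's single indexed loop with an i < len(second_word) branch by an algebraic reformulation: a baseline sum of all first_word ords plus an overlap correction sum of ord(a)*(ord(b)-1), using the identity a*b = a + a*(b-1); no branch and no tail/overlap partition.
import Mathlib
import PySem

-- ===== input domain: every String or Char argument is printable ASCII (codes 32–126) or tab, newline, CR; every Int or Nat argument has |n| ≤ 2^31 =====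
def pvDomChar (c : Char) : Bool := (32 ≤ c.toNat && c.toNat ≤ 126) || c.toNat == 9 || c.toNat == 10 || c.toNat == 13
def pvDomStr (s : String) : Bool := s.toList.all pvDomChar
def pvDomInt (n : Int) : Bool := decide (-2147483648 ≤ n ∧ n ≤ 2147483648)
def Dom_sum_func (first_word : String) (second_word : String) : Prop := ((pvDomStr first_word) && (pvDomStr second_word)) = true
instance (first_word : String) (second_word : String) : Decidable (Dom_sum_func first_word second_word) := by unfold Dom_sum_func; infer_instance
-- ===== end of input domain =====

-- B replaces A's branchy indexed loop by an algebraic reformulation: baseline sum of all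
-- first_word ords plus an overlap correction ord(a)*(ord(b)-1), via a*b = a + a*(b-1) (alternative).


-- ===== PORT A =====
-- for i in range(len(first_word)): if i < len(second_word): total += ord(f[i])*ord(s[i]) else: total += ord(f[i])
-- indexing is always in range, so pyGetD's default is never read
def sum_func (first_word : String) (second_word : String) : Int :=
  let f := first_word.toList
  let s := second_word.toList
  (PySem.List.pyRange 0 (f.length : Int) 1).foldl
    (fun total_sum i =>
      if i < (s.length : Int) then
        total_sum + ((PySem.List.pyGetD f i ' ').toNat : Int) * ((PySem.List.pyGetD s i ' ').toNat : Int)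
      else
        total_sum + ((PySem.List.pyGetD f i ' ').toNat : Int))
    0

-- ===== PORT B =====
-- base = sum(map(ord, first_word)); correction = sum(ord(a)*(ord(b)-1) for a,b in zip(f, s))
def sum_func_alt (first_word : String) (second_word : String) : Int :=
  let f := first_word.toList
  let s := second_word.toList
  let base := (f.map (fun c => (c.toNat : Int))).sum
  let correction := ((f.zip s).map (fun p => ((p.1.toNat : Int)) * ((p.2.toNat : Int) - 1))).sum
  base + correction

-- ===== PRECONDITION & SPEC =====
def Spec_sum_func (first_word : String) (second_word : String) (out : Int) : Prop := out = sum_func_alt first_word second_word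
instance (first_word : String) (second_word : String) (out : Int) : Decidable (Spec_sum_func first_word second_word out) := by unfold Spec_sum_func; infer_instance

-- ===== CLAIM (what is proved, stated in full; the proofs are below) =====
def Claim_equal_sum_func : Prop := ∀ (first_word : String) (second_word : String), Dom_sum_func first_word second_word → Spec_sum_func first_word second_word (sum_func first_word second_word)

-- ===== LEMMAS AND PROOFS =====

-- core fact: the branchy indexed sum equals baseline + overlap correction
lemma pv_key (f : List Char) : ∀ (s : List Char),
    ((List.range f.length).map (fun (k : Nat) =>
      if (k : Int) < (s.length : Int) then
        ((f.getD k ' ').toNat : Int) * ((s.getD k ' ').toNat : Int)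
      else
        ((f.getD k ' ').toNat : Int))).sum
    = (f.map (fun c => (c.toNat : Int))).sum
      + ((f.zip s).map (fun p => ((p.1.toNat : Int)) * ((p.2.toNat : Int) - 1))).sum := by
  induction f with
  | nil => intro s; simp
  | cons c f ih =>
    intro s
    cases s with
    | nil =>
      have h := ih []
      have hno : ∀ k : Nat, ((k : Int) < ((0 : Nat) : Int)) = False := by
        intro k; simp only [eq_iff_iff, iff_false]; push_cast; omega
      simp only [List.length_nil, List.zip_nil_right, List.map_nil, List.sum_nil, add_zero] at h ⊢
      simp only [List.length_cons, List.range_succ_eq_map, List.map_cons, List.map_map,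
        List.sum_cons, Function.comp_def, List.getD_cons_succ, List.getD_cons_zero,
        hno, if_false]
      simp only [hno, if_false] at h
      rw [h]
    | cons b s =>
      have h := ih s
      simp only [List.length_cons, List.range_succ_eq_map, List.map_cons, List.map_map,
        List.sum_cons, Function.comp_def, Nat.succ_eq_add_one, List.getD_cons_succ,
        List.getD_cons_zero, List.zip_cons_cons]
      have hshift : ∀ k : Nat, (((k+1 : Nat) : Int) < ((s.length + 1 : Nat) : Int)) =
          ((k : Int) < (s.length : Int)) := by
        intro k; simp only [eq_iff_iff]; push_cast; omega
      simp only [hshift]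
      rw [if_pos (show (((0:Nat) : Int) < ((s.length + 1 : Nat) : Int)) by push_cast; omega), h]
      ring

-- ===== VERDICT (by name: the statement is the Claim_ definition above) =====
theorem sum_func_spec : Claim_equal_sum_func := by
  intro first_word second_word _
  unfold Spec_sum_func
  unfold sum_func sum_func_alt
  dsimp only
  have hstep : (fun (total_sum : Int) (y : Nat) =>
      if ((y : Int)) < (second_word.toList.length : Int) then
        total_sum + ((PySem.List.pyGetD first_word.toList (y : Int) ' ').toNat : Int) * ((PySem.List.pyGetD second_word.toList (y : Int) ' ').toNat : Int)
      else
        total_sum + ((PySem.List.pyGetD first_word.toList (y : Int) ' ').toNat : Int))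
      = fun total_sum (y : Nat) => total_sum +
          (if ((y : Int)) < (second_word.toList.length : Int) then
            ((PySem.List.pyGetD first_word.toList (y : Int) ' ').toNat : Int) * ((PySem.List.pyGetD second_word.toList (y : Int) ' ').toNat : Int)
          else
            ((PySem.List.pyGetD first_word.toList (y : Int) ' ').toNat : Int)) := by
    funext t y; split_ifs <;> rfl
  rw [PySem.List.pyRange_zero_nat, List.foldl_map]
  rw [hstep, PySem.List.foldl_add]
  simp only [PySem.List.pyGetD_natCast, zero_add]
  exact pv_key first_word.toList second_word.toList
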